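-- pv_equiv track=rewrite | github.com/pedroailton/flyfood-pisi-2 | 2VA/flyfood/converter.py | construirMatrizDistancias
-- ===== SOURCE A (Python) =====
-- def calcularDistancia(p1, p2):
--     """Calcula a distância Manhattan entre dois pontos (tuplas)."""
--     return abs(p1[0] - p2[0]) + abs(p1[1] - p2[1])
--
-- def construirMatrizDistancias(pontos, coords):
--     """
--     Monta uma matriz com as distâncias entre todos os pontos.
--     """
--     n = len(pontos)  # quantidade total de pontos
--     D = []  # matriz de distâncias
--
--     # cria uma matriz n x n com zeros
--     for i in range(n):
--         linha = []
--         for j in range(n):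
--             linha.append(0)
--         D.append(linha)
--
--     # preenche a parte de cima da matriz
--     for i in range(n):
--         for j in range(i + 1, n):  # começa no i+1 pra não repetir os pares
--             p1 = coords[pontos[i]]
--             p2 = coords[pontos[j]]
--             dist = calcularDistancia(p1, p2)
--             D[i][j] = dist
--             D[j][i] = dist  # espelha o valor
--
--     return D
-- ===== SOURCE B (Python) =====
-- def construirMatrizDistancias(pontos, coords):
--     pts = [coords[p] for p in pontos]
--     return [[abs(a[0] - b[0]) + abs(a[1] - b[1]) for b in pts] for a in pts]
-- ===== Notes on version B (the rewrite author's own statement) =====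
-- stated objective: simpler
-- what changed: Drops the zero-initialization pass and the upper-triangle-plus-mirror in-place fill; instead resolves coordinates once and builds every cell directly with a nested comprehension, relying on dist(p,p)=0 for the diagonal.
-- outside the precondition, e.g. on construirMatrizDistancias(['x'], {}): A returns [[0]], B raises KeyError
import Mathlib
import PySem

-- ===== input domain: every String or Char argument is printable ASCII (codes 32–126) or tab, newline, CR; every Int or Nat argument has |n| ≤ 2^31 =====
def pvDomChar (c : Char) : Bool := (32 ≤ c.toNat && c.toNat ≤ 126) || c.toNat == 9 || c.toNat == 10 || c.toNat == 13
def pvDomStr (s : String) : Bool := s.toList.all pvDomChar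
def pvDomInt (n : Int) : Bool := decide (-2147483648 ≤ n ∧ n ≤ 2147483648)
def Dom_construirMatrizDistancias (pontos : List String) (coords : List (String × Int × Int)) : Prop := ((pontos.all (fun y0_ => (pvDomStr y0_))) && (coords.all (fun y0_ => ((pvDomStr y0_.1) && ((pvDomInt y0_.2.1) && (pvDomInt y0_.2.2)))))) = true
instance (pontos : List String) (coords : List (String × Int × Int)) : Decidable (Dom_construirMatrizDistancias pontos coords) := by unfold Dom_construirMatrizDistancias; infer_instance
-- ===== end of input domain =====

-- B replaces A's zero-init pass and upper-triangle+mirror fill by a direct nested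
-- comprehension over the resolved coordinates (objective: simpler). Equivalence of the RETURN value is proved on Pre_ (all point names
-- present in coords; elsewhere Python A raises KeyError).

-- dict lookup coords[p]: first matching key in the association list (exact on Pre_,
-- where the key is present; the (0,0) default is never reached there)
def pvLookup (coords : List (String × Int × Int)) (p : String) : Int × Int :=
  (((coords.find? (fun e => e.1 == p)).map (·.2)).getD (0, 0))

-- ===== PORT A =====
def calcularDistancia (p1 p2 : Int × Int) : Int :=
  |p1.1 - p2.1| + |p1.2 - p2.2|

def construirMatrizDistancias (pontos : List String) (coords : List (String × Int × Int)) : List (List Int) :=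
  let n : Int := pontos.length
  -- cria uma matriz n x n com zeros
  let D : List (List Int) :=
    (PySem.List.pyRange 0 n 1).foldl (fun D _ =>
      let linha := (PySem.List.pyRange 0 n 1).foldl (fun l _ => l ++ [(0 : Int)]) []
      D ++ [linha]) []
  -- preenche a parte de cima da matriz (e espelha); índices i, j vêm de range,
  -- portanto não-negativos e dentro dos limites: pySetD/pyGetD são exatos aqui
  (PySem.List.pyRange 0 n 1).foldl (fun D i =>
    (PySem.List.pyRange (i + 1) n 1).foldl (fun D j =>
      let p1 := pvLookup coords (PySem.List.pyGetD pontos i "")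
      let p2 := pvLookup coords (PySem.List.pyGetD pontos j "")
      let dist := calcularDistancia p1 p2
      let D := PySem.List.pySetD D i (PySem.List.pySetD (PySem.List.pyGetD D i []) j dist)
      PySem.List.pySetD D j (PySem.List.pySetD (PySem.List.pyGetD D j []) i dist)) D) D

-- ===== PORT B =====
def construirMatrizDistancias_alt (pontos : List String) (coords : List (String × Int × Int)) : List (List Int) :=
  let pts := pontos.map (fun p => pvLookup coords p)
  pts.map (fun a => pts.map (fun b => |a.1 - b.1| + |a.2 - b.2|))

-- ===== PRECONDITION & SPEC =====
-- Pre_ excludes inputs with a point name missing from coords: there Python A raises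
-- KeyError except in the degenerate case of fewer than two points (its fill loop then
-- performs no lookup and returns a zero matrix), while B, which resolves every name
-- upfront, raises KeyError; both behaviours are defensible on such malformed input.
def Pre_construirMatrizDistancias (pontos : List String) (coords : List (String × Int × Int)) : Prop :=
  ∀ p ∈ pontos, p ∈ coords.map (·.1)
instance (pontos : List String) (coords : List (String × Int × Int)) : Decidable (Pre_construirMatrizDistancias pontos coords) := by unfold Pre_construirMatrizDistancias; infer_instance

def pvWitness_construirMatrizDistancias : List String × (List (String × Int × Int)) :=
  (["a", "b", "c"], [("a", 0, 0), ("b", 2, 1), ("c", -1, 4)])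

def Spec_construirMatrizDistancias (pontos : List String) (coords : List (String × Int × Int)) (out : List (List Int)) : Prop := out = construirMatrizDistancias_alt pontos coords
instance (pontos : List String) (coords : List (String × Int × Int)) (out : List (List Int)) : Decidable (Spec_construirMatrizDistancias pontos coords out) := by unfold Spec_construirMatrizDistancias; infer_instance

-- ===== CLAIM (what is proved, stated in full; the proofs are below) =====
def Claim_equal_construirMatrizDistancias : Prop := ∀ (pontos : List String) (coords : List (String × Int × Int)), Dom_construirMatrizDistancias pontos coords → Pre_construirMatrizDistancias pontos coords → Spec_construirMatrizDistancias pontos coords (construirMatrizDistancias pontos coords)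

-- ===== LEMMAS AND PROOFS =====

-- abstract n×n matrix with entry function w
def pvMat (n : Nat) (w : Nat → Nat → Int) : List (List Int) :=
  (List.range n).map (fun a => (List.range n).map (fun b => w a b))

theorem pvMat_congr (n : Nat) (w1 w2 : Nat → Nat → Int)
    (h : ∀ a b, a < n → b < n → w1 a b = w2 a b) : pvMat n w1 = pvMat n w2 := by
  unfold pvMat
  apply List.map_congr_left
  intro a ha
  apply List.map_congr_left
  intro b hb
  exact h a b (List.mem_range.mp ha) (List.mem_range.mp hb)

theorem pvMat_getD (n : Nat) (w : Nat → Nat → Int) (k : Nat) (hk : k < n) :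
    (pvMat n w).getD k [] = (List.range n).map (w k) := by
  rw [List.getD_eq_getElem _ _ (by simpa [pvMat] using hk)]
  simp [pvMat]

theorem pvMat_set_row (n : Nat) (w : Nat → Nat → Int) (k : Nat) (hk : k < n) (row : List Int) :
    (pvMat n w).set k row = (List.range n).map (fun a => if a = k then row else (List.range n).map (w a)) := by
  apply List.ext_getElem
  · simp [pvMat]
  · intro i h1 h2
    simp only [pvMat, List.getElem_set, List.getElem_map, List.getElem_range] at *
    split_ifs with h h'
    · simp [h]
    · omega
    · omega
    · rfl

theorem pvRow_set (n : Nat) (f : Nat → Int) (m : Nat) (hm : m < n) (v : Int) :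
    ((List.range n).map f).set m v = (List.range n).map (fun b => if b = m then v else f b) := by
  apply List.ext_getElem
  · simp
  · intro i h1 h2
    simp only [List.getElem_set, List.getElem_map, List.getElem_range] at *
    split_ifs with h h'
    · rfl
    · omega
    · omega
    · rfl

-- one assignment D[i][j] = v on pvMat
theorem pvMat_assign (n : Nat) (w : Nat → Nat → Int) (i j : Nat) (hi : i < n) (hj : j < n) (v : Int) :
    PySem.List.pySetD (pvMat n w) (i : Int)
      (PySem.List.pySetD (PySem.List.pyGetD (pvMat n w) (i : Int) []) (j : Int) v)
    = pvMat n (fun a b => if a = i ∧ b = j then v else w a b) := by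
  simp only [PySem.List.pySetD_natCast, PySem.List.pyGetD_natCast]
  rw [pvMat_getD n w i hi, pvRow_set n (w i) j hj v, pvMat_set_row n w i hi]
  unfold pvMat
  apply List.map_congr_left
  intro a _
  by_cases ha : a = i
  · subst ha; simp
  · simp [ha]

-- the per-pair body of A's fill loops (g resolves an index to its coordinates)
def pvStep (g : Int → Int × Int) (i : Int) (D : List (List Int)) (j : Int) : List (List Int) :=
  PySem.List.pySetD
    (PySem.List.pySetD D i
      (PySem.List.pySetD (PySem.List.pyGetD D i []) j (calcularDistancia (g i) (g j)))) j
    (PySem.List.pySetD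
      (PySem.List.pyGetD
        (PySem.List.pySetD D i
          (PySem.List.pySetD (PySem.List.pyGetD D i []) j (calcularDistancia (g i) (g j)))) j [])
      i (calcularDistancia (g i) (g j)))

theorem calcularDistancia_comm (p q : Int × Int) : calcularDistancia p q = calcularDistancia q p := by
  simp [calcularDistancia, abs_sub_comm]

theorem pvStep_mat (g : Int → Int × Int) (n k m : Nat) (w : Nat → Nat → Int)
    (hk : k < n) (hm : m < n) :
    pvStep g (k : Int) (pvMat n w) (m : Int)
    = pvMat n (fun a b =>
        if a = m ∧ b = k then calcularDistancia (g k) (g m)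
        else if a = k ∧ b = m then calcularDistancia (g k) (g m) else w a b) := by
  unfold pvStep
  rw [pvMat_assign n w k m hk hm, pvMat_assign n _ m k hm hk]

-- inner loop: for j in range(m, n): set (k,j) and (j,k)
theorem pvInner (g : Int → Int × Int) (n k : Nat) (hk : k < n) :
    ∀ (fuel m : Nat) (w : Nat → Nat → Int), n - m = fuel → k < m →
    (PySem.List.pyRange (m : Int) (n : Int) 1).foldl (pvStep g (k : Int)) (pvMat n w)
    = pvMat n (fun a b =>
        if (a = k ∧ m ≤ b ∧ b < n) ∨ (b = k ∧ m ≤ a ∧ a < n)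
        then calcularDistancia (g a) (g b) else w a b) := by
  intro fuel
  induction fuel with
  | zero =>
    intro m w hfu hkm
    rw [PySem.List.pyRange_one_eq_nil (by omega)]
    simp only [List.foldl_nil]
    apply pvMat_congr
    intro a b _ _
    have : ¬ ((a = k ∧ m ≤ b ∧ b < n) ∨ (b = k ∧ m ≤ a ∧ a < n)) := by omega
    rw [if_neg this]
  | succ f ih =>
    intro m w hfu hkm
    have hmn : m < n := by omega
    rw [PySem.List.pyRange_one_cons (by exact_mod_cast hmn)]
    simp only [List.foldl_cons]
    rw [pvStep_mat g n k m w hk hmn]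
    have : ((m : Int) + 1) = ((m + 1 : Nat) : Int) := by push_cast; ring
    rw [this, ih (m + 1) _ (by omega) (by omega)]
    apply pvMat_congr
    intro a b ha hb
    by_cases h1 : a = k ∧ b = m
    · have e1 : ¬ ((a = k ∧ m + 1 ≤ b ∧ b < n) ∨ (b = k ∧ m + 1 ≤ a ∧ a < n)) := by omega
      have e2 : ¬ (a = m ∧ b = k) := by omega
      rw [if_neg e1, if_neg e2, if_pos h1,
          if_pos (Or.inl ⟨h1.1, by omega, by omega⟩), h1.1, h1.2]
    · by_cases h2 : a = m ∧ b = k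
      · have e1 : ¬ ((a = k ∧ m + 1 ≤ b ∧ b < n) ∨ (b = k ∧ m + 1 ≤ a ∧ a < n)) := by omega
        rw [if_neg e1, if_pos h2,
            if_pos (Or.inr ⟨h2.2, by omega, by omega⟩), h2.1, h2.2, calcularDistancia_comm]
      · by_cases h3 : (a = k ∧ m ≤ b ∧ b < n) ∨ (b = k ∧ m ≤ a ∧ a < n)
        · rw [if_pos (show (a = k ∧ m + 1 ≤ b ∧ b < n) ∨ (b = k ∧ m + 1 ≤ a ∧ a < n) by omega),
              if_pos h3]
        · rw [if_neg (show ¬ ((a = k ∧ m + 1 ≤ b ∧ b < n) ∨ (b = k ∧ m + 1 ≤ a ∧ a < n)) by omega),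
              if_neg h2, if_neg h1, if_neg h3]

-- running state of the outer loop after rows 0..k-1
def pvU (g : Int → Int × Int) (k : Nat) (a b : Nat) : Int :=
  if a ≠ b ∧ (a < k ∨ b < k) then calcularDistancia (g a) (g b) else 0

-- outer loop: for i in range(k, n)
theorem pvOuter (g : Int → Int × Int) (n : Nat) :
    ∀ (fuel k : Nat), n - k = fuel →
    (PySem.List.pyRange (k : Int) (n : Int) 1).foldl
      (fun D i => (PySem.List.pyRange (i + 1) (n : Int) 1).foldl (pvStep g i) D)
      (pvMat n (pvU g k))
    = pvMat n (pvU g n) := by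
  intro fuel
  induction fuel with
  | zero =>
    intro k hfu
    by_cases hkn : k = n
    · subst hkn
      rw [PySem.List.pyRange_one_eq_nil (by omega)]
      simp only [List.foldl_nil]
    · -- k > n: range empty and pvU k, pvU n agree below n
      rw [PySem.List.pyRange_one_eq_nil (by omega)]
      simp only [List.foldl_nil]
      apply pvMat_congr
      intro a b ha hb
      unfold pvU
      have : (a ≠ b ∧ (a < k ∨ b < k)) ↔ (a ≠ b ∧ (a < n ∨ b < n)) := by omega
      rw [if_congr this rfl rfl]
  | succ f ih =>
    intro k hfu
    have hkn : k < n := by omega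
    rw [PySem.List.pyRange_one_cons (by exact_mod_cast hkn)]
    simp only [List.foldl_cons]
    have hcast : ((k : Int) + 1) = ((k + 1 : Nat) : Int) := by push_cast; ring
    rw [hcast, pvInner g n k hkn f (k + 1) (pvU g k) (by omega) (by omega)]
    have heq : pvMat n (fun a b =>
        if (a = k ∧ k + 1 ≤ b ∧ b < n) ∨ (b = k ∧ k + 1 ≤ a ∧ a < n)
        then calcularDistancia (g a) (g b) else pvU g k a b) = pvMat n (pvU g (k + 1)) := by
      apply pvMat_congr
      intro a b ha hb
      unfold pvU
      by_cases h1 : (a = k ∧ k + 1 ≤ b ∧ b < n) ∨ (b = k ∧ k + 1 ≤ a ∧ a < n)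
      · rw [if_pos h1, if_pos (by omega)]
      · rw [if_neg h1]
        have : (a ≠ b ∧ (a < k ∨ b < k)) ↔ (a ≠ b ∧ (a < k + 1 ∨ b < k + 1)) := by omega
        rw [if_congr this rfl rfl]
    rw [heq, ih (k + 1) (by omega)]

-- A's zero-initialization builds pvMat n 0
theorem pvZeros (n : Nat) :
    (PySem.List.pyRange 0 (n : Int) 1).foldl (fun D _ =>
      D ++ [(PySem.List.pyRange 0 (n : Int) 1).foldl (fun l _ => l ++ [(0 : Int)]) []]) []
    = pvMat n (fun _ _ => 0) := by
  rw [PySem.List.foldl_append_singleton_eq_map, PySem.List.foldl_append_singleton_eq_map]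
  simp only [List.nil_append]
  unfold pvMat
  rw [PySem.List.pyRange_zero_nat]
  simp [Function.comp_def, List.map_const']

-- B's matrix is pvMat of the resolved distance function
theorem pvAltEq (pontos : List String) (coords : List (String × Int × Int)) :
    construirMatrizDistancias_alt pontos coords
    = pvMat pontos.length (fun a b =>
        calcularDistancia (pvLookup coords (PySem.List.pyGetD pontos (a : Int) ""))
                          (pvLookup coords (PySem.List.pyGetD pontos (b : Int) ""))) := by
  show (pontos.map (fun p => pvLookup coords p)).map
      (fun a => (pontos.map (fun p => pvLookup coords p)).map
        (fun b => |a.1 - b.1| + |a.2 - b.2|)) = _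
  apply List.ext_getElem
  · simp [pvMat]
  · intro i h1 h2
    simp only [List.length_map] at h1
    simp only [pvMat, List.getElem_map, List.getElem_range]
    apply List.ext_getElem
    · simp
    · intro j g1 g2
      simp only [List.length_map] at g1
      simp only [List.getElem_map, List.getElem_range]
      rw [PySem.List.pyGetD_natCast, PySem.List.pyGetD_natCast,
          List.getD_eq_getElem _ _ (by omega), List.getD_eq_getElem _ _ (by omega)]
      rfl

-- ===== VERDICT (by name: the statement is the Claim_ definition above) =====
theorem construirMatrizDistancias_spec : Claim_equal_construirMatrizDistancias := by
  intro pontos coords _ _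
  unfold Spec_construirMatrizDistancias
  have hA : construirMatrizDistancias pontos coords
      = (PySem.List.pyRange ((0 : Nat) : Int) (pontos.length : Int) 1).foldl
          (fun D i => (PySem.List.pyRange (i + 1) (pontos.length : Int) 1).foldl
            (pvStep (fun t => pvLookup coords (PySem.List.pyGetD pontos t "")) i) D)
          ((PySem.List.pyRange 0 (pontos.length : Int) 1).foldl (fun D _ =>
            D ++ [(PySem.List.pyRange 0 (pontos.length : Int) 1).foldl (fun l _ => l ++ [(0 : Int)]) []]) []) := rfl
  rw [hA]
  set g : Int → Int × Int := fun t => pvLookup coords (PySem.List.pyGetD pontos t "") with hg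
  rw [pvZeros pontos.length]
  have hinit : pvMat pontos.length (fun _ _ => 0) = pvMat pontos.length (pvU g 0) := by
    apply pvMat_congr; intro a b _ _; unfold pvU
    rw [if_neg (by omega)]
  rw [hinit, pvOuter g pontos.length (pontos.length - 0) 0 rfl, pvAltEq]
  apply pvMat_congr
  intro a b ha hb
  unfold pvU
  by_cases hab : a = b
  · subst hab
    rw [if_neg (by omega)]
    simp [calcularDistancia]
  · rw [if_pos ⟨hab, by omega⟩]
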